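-- pv_equiv track=rewrite | github.com/pypi-data/pypi-mirror-271 | packages/yappt/yappt-0.3.2-py3-none-any.whl/yappt/util.py | iter_more
-- ===== SOURCE A (Python) =====
-- from typing import Iterable, TypeVar, Union, get_origin
--
-- T = TypeVar("T")
--
-- def iter_more(xs: Iterable[T]) -> Iterable[tuple[bool, T]]:
--     """retrun a new iterable based on the given iterable, that peeks past the current value for existence and returns
--     tuple (more, item), where more is True if current is not the last item
--
--     Args:
--         xs: An Iterable of type T
--
--     Returns:
--         An Iterable of tuple[bool, T]; where T is from the original Iterable, and bool will be True if there is
--         at least one more item that be returned by next()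
--     """
--     _xs = iter(xs)
--     try:
--         x = next(_xs)
--     except StopIteration:
--         return
--
--     for _x in _xs:
--         yield (True, x)
--         x = _x
--
--     yield (False, x)
-- ===== SOURCE B (Python) =====
-- from itertools import tee, islice, zip_longest
--
-- def iter_more(xs):
--     a, b = tee(iter(xs))
--     sentinel = object()
--     for cur, nxt in zip_longest(a, islice(b, 1, None), fillvalue=sentinel):
--         yield (nxt is not sentinel, cur)
-- ===== Notes on version B (the rewrite author's own statement) =====
-- stated objective: idiomatic
-- what changed: Replaces the hand-rolled one-element-lookahead loop (prime with next(), carry previous, trailing yield) with two tee'd iterators staggered by one and zip_longest against a fresh sentinel.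
import Mathlib
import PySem

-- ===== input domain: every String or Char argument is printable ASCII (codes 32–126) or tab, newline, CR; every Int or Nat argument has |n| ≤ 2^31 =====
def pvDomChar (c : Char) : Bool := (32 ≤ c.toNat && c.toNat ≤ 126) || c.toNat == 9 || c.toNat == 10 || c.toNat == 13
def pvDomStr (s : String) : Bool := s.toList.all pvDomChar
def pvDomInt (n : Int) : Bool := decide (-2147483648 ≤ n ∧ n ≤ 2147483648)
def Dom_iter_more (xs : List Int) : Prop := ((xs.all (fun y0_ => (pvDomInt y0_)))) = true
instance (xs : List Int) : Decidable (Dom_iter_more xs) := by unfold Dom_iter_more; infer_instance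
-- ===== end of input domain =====

-- ===== PORT A =====
-- carry the previously fetched element; yield (True, prev) while more remain, (False, prev) at the end
def iterMoreGo (x : Int) (rest : List Int) : List (Bool × Int) :=
  match rest with
  | [] => [(false, x)]
  | y :: t => (true, x) :: iterMoreGo y t

def iter_more (xs : List Int) : List (Bool × Int) :=
  match xs with
  | [] => []
  | x :: rest => iterMoreGo x rest

-- ===== PORT B =====
-- B: zip the list with its one-step-shifted self padded with none (the sentinel); more = nxt ≠ sentinel
def iter_more_alt (xs : List Int) : List (Bool × Int) :=
  (xs.zip ((xs.drop 1).map Option.some ++ [Option.none])).map (fun p => (p.2.isSome, p.1))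

-- ===== PRECONDITION & SPEC =====
def Spec_iter_more (xs : List Int) (out : List (Bool × Int)) : Prop := out = iter_more_alt xs
instance (xs : List Int) (out : List (Bool × Int)) : Decidable (Spec_iter_more xs out) := by unfold Spec_iter_more; infer_instance

-- ===== CLAIM (what is proved, stated in full; the proofs are below) =====
def Claim_equal_iter_more : Prop := ∀ (xs : List Int), Dom_iter_more xs → Spec_iter_more xs (iter_more xs)

-- ===== LEMMAS AND PROOFS =====

-- ===== VERDICT (by name: the statement is the Claim_ definition above) =====
theorem go_eq (rest : List Int) : ∀ (x : Int),
    iterMoreGo x rest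
      = ((x :: rest).zip (rest.map Option.some ++ [Option.none])).map (fun p => (p.2.isSome, p.1)) := by
  induction rest with
  | nil => intro x; simp [iterMoreGo]
  | cons y t ih => intro x; simp [iterMoreGo, ih y]

theorem iter_more_spec : Claim_equal_iter_more := by
  intro xs _
  unfold Spec_iter_more iter_more iter_more_alt
  cases xs with
  | nil => simp
  | cons x rest => simpa using go_eq rest x
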